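-- pv_equiv track=rewrite | github.com/mkXultra/mew | src/mew/long_build_substrate.py | _shell_text_has_unquoted_background_operator
-- ===== SOURCE A (Python) =====
-- def _shell_text_has_unquoted_background_operator(text: object) -> bool:
--     value = str(text or "")
--     in_single = False
--     in_double = False
--     escaped = False
--     for index, char in enumerate(value):
--         if escaped:
--             escaped = False
--             continue
--         if char == "\\" and not in_single:
--             escaped = True
--             continue
--         if char == "'" and not in_double:
--             in_single = not in_single
--             continue
--         if char == '"' and not in_single:
--             in_double = not in_double
--             continue
--         if in_single or in_double or char != "&":
--             continue
--         previous_char = value[index - 1] if index > 0 else ""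
--         next_char = value[index + 1] if index + 1 < len(value) else ""
--         if previous_char in {"<", ">"} or next_char in {"<", ">"}:
--             continue
--         if previous_char != "&" and next_char != "&":
--             return True
--     return False
-- ===== SOURCE B (Python) =====
-- def _skip_single(value, i):
--     # advance past a single-quoted segment opened just before index i
--     n = len(value)
--     while i < n:
--         if value[i] == "'":
--             return i + 1
--         i += 1
--     return i
--
--
-- def _skip_double(value, i):
--     # advance past a double-quoted segment opened just before index i
--     n = len(value)
--     while i < n:
--         if value[i] == "\\":
--             i += 2
--         elif value[i] == '"':
--             return i + 1
--         else:
--             i += 1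
--     return i
--
--
-- def _neighbor_hit(value, i):
--     n = len(value)
--     prev = value[i - 1] if i > 0 else ""
--     nxt = value[i + 1] if i + 1 < n else ""
--     if prev in {"<", ">"} or nxt in {"<", ">"}:
--         return False
--     return prev != "&" and nxt != "&"
--
--
-- def _shell_text_has_unquoted_background_operator(text: object) -> bool:
--     value = str(text or "")
--     n = len(value)
--     i = 0
--     # Segment-skipping scan: stay only in the "outside quotes" state and jump
--     # over escaped pairs and whole quoted segments in dedicated helpers.
--     while i < n:
--         ch = value[i]
--         if ch == "\\":
--             i += 2
--         elif ch == "'":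
--             i = _skip_single(value, i + 1)
--         elif ch == '"':
--             i = _skip_double(value, i + 1)
--         elif ch == "&" and _neighbor_hit(value, i):
--             return True
--         else:
--             i += 1
--     return False
-- ===== Notes on version B (the rewrite author's own statement) =====
-- stated objective: alternative
-- what changed: Replaces A's single per-character state machine carrying (in_single,in_double,escaped) flags by a segment-skipping scan: the main loop stays only in the outside-quotes state and dedicated helper loops jump over escape pairs and whole single-/double-quoted segments, with the neighbour rule factored into its own helper on the raw string.
import Mathlib
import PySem

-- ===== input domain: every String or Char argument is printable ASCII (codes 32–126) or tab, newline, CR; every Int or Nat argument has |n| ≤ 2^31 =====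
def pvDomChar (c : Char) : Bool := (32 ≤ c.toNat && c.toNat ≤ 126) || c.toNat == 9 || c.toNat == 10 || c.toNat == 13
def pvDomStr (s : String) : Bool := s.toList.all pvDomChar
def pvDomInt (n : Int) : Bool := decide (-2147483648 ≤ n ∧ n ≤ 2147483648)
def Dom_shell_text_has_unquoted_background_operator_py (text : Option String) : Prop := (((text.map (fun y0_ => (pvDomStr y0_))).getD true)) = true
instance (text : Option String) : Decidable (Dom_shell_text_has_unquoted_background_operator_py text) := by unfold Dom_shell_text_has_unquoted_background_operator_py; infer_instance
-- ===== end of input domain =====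

-- B replaces A's per-character quote/escape state machine by a segment-skipping scan
-- (dedicated helpers jump over whole quoted segments and escape pairs); alternative
-- decomposition, same cost.

-- ===== PORT A =====
-- A's loop: one pass carrying (in_single, in_double, escaped), testing '&' inline.
def pvLoopA (value : List Char) (n : Int) : List Char → Int → Bool → Bool → Bool → Bool
  | [], _, _, _, _ => false
  | c :: rest, i, s, d, e =>
    if e then pvLoopA value n rest (i + 1) s d false
    else if c = '\\' ∧ ¬ s then pvLoopA value n rest (i + 1) s d true
    else if c = '\'' ∧ ¬ d then pvLoopA value n rest (i + 1) (!s) d false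
    else if c = '"' ∧ ¬ s then pvLoopA value n rest (i + 1) s (!d) false
    else if s ∨ d ∨ c ≠ '&' then pvLoopA value n rest (i + 1) s d e
    else
      let prev : Option Char := if i > 0 then PySem.List.pyGet? value (i - 1) else none
      let next : Option Char := if i + 1 < n then PySem.List.pyGet? value (i + 1) else none
      if prev = some '<' ∨ prev = some '>' ∨ next = some '<' ∨ next = some '>' then
        pvLoopA value n rest (i + 1) s d e
      else if prev ≠ some '&' ∧ next ≠ some '&' then true
      else pvLoopA value n rest (i + 1) s d e

def shell_text_has_unquoted_background_operator_py (text : Option String) : Bool :=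
  let value := (text.getD "").toList
  pvLoopA value value.length value 0 false false false

-- ===== PORT B =====
-- _skip_single: advance past a single-quoted segment (remaining chars, index).
def pvSkipSingle : List Char → Int → List Char × Int
  | [], i => ([], i)
  | c :: rest, i => if c = '\'' then (rest, i + 1) else pvSkipSingle rest (i + 1)

-- _skip_double: advance past a double-quoted segment; backslash skips a pair.
def pvSkipDouble : List Char → Int → List Char × Int
  | [], i => ([], i)
  | c :: rest, i =>
    if c = '\\' then pvSkipDouble (rest.drop 1) (i + 2)
    else if c = '"' then (rest, i + 1)
    else pvSkipDouble rest (i + 1)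
  termination_by l _ => l.length
  decreasing_by
  · simp
  · simp

-- _neighbor_hit: the raw-neighbour rule on the original string.
def pvNeighborHit (value : List Char) (n i : Int) : Bool :=
  let prev : Option Char := if i > 0 then PySem.List.pyGet? value (i - 1) else none
  let next : Option Char := if i + 1 < n then PySem.List.pyGet? value (i + 1) else none
  if prev = some '<' ∨ prev = some '>' ∨ next = some '<' ∨ next = some '>' then false
  else decide (prev ≠ some '&' ∧ next ≠ some '&')

theorem pvSkipSingle_len : ∀ (l : List Char) (i : Int), (pvSkipSingle l i).1.length ≤ l.length := by
  intro l
  induction l with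
  | nil => intro i; simp [pvSkipSingle]
  | cons c rest ih =>
    intro i
    by_cases h : c = '\''
    · simp [pvSkipSingle, h]
    · simp only [pvSkipSingle, if_neg h]
      exact (ih (i + 1)).trans (by simp)

theorem pvSkipDouble_len (l : List Char) (i : Int) : (pvSkipDouble l i).1.length ≤ l.length := by
  induction l, i using pvSkipDouble.induct with
  | case1 i => simp [pvSkipDouble]
  | case2 rest i ih =>
    simp only [pvSkipDouble]
    rw [if_pos trivial]
    exact ih.trans (by simp only [List.length_drop, List.length_cons]; omega)
  | case3 rest i h => simp [pvSkipDouble]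
  | case4 c rest i h1 h2 ih =>
    simp only [pvSkipDouble, if_neg h1, if_neg h2]
    exact ih.trans (by simp)

-- main scan: stays in the outside-quotes state only, jumping over segments.
def pvScanOut (value : List Char) (n : Int) : List Char → Int → Bool
  | [], _ => false
  | c :: rest, i =>
    if c = '\\' then pvScanOut value n (rest.drop 1) (i + 2)
    else if c = '\'' then
      let p := pvSkipSingle rest (i + 1)
      pvScanOut value n p.1 p.2
    else if c = '"' then
      let p := pvSkipDouble rest (i + 1)
      pvScanOut value n p.1 p.2
    else if c = '&' ∧ pvNeighborHit value n i then true
    else pvScanOut value n rest (i + 1)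
  termination_by l _ => l.length
  decreasing_by
  · simp only [List.length_drop, List.length_cons]; omega
  · exact Nat.lt_succ_of_le (pvSkipSingle_len rest (i + 1))
  · exact Nat.lt_succ_of_le (pvSkipDouble_len rest (i + 1))
  · simp

def shell_text_has_unquoted_background_operator_py_alt (text : Option String) : Bool :=
  let value := (text.getD "").toList
  pvScanOut value value.length value 0

-- ===== PRECONDITION & SPEC =====
def Spec_shell_text_has_unquoted_background_operator_py (text : Option String) (out : Bool) : Prop := out = shell_text_has_unquoted_background_operator_py_alt text
instance (text : Option String) (out : Bool) : Decidable (Spec_shell_text_has_unquoted_background_operator_py text out) := by unfold Spec_shell_text_has_unquoted_background_operator_py; infer_instance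

-- ===== CLAIM =====
def Claim_equal_shell_text_has_unquoted_background_operator_py : Prop := ∀ (text : Option String), Dom_shell_text_has_unquoted_background_operator_py text → Spec_shell_text_has_unquoted_background_operator_py text (shell_text_has_unquoted_background_operator_py text)

-- ===== LEMMAS AND PROOFS =====
-- A in escaped state consumes one character unconditionally.
theorem pvLoopA_escaped (value : List Char) (n : Int) (cs : List Char) (i : Int) (s d : Bool) :
    pvLoopA value n cs i s d true = pvLoopA value n (cs.drop 1) (i + 1) s d false := by
  cases cs <;> simp [pvLoopA]

-- A in single-quote state runs to the closing quote.
theorem pvLoopA_single (value : List Char) (n : Int) :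
    ∀ (cs : List Char) (i : Int),
      pvLoopA value n cs i true false false =
        pvLoopA value n (pvSkipSingle cs i).1 (pvSkipSingle cs i).2 false false false := by
  intro cs
  induction cs with
  | nil => intro i; simp [pvSkipSingle, pvLoopA]
  | cons c rest ih =>
    intro i
    by_cases h : c = '\''
    · subst h
      simp [pvLoopA, pvSkipSingle]
    · have hA : pvLoopA value n (c :: rest) i true false false =
          pvLoopA value n rest (i + 1) true false false := by
        simp only [pvLoopA]
        rw [if_neg (by simp), if_neg (by simp), if_neg (by simp [h]),
          if_neg (by simp), if_pos (by simp)]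
      rw [hA, ih, pvSkipSingle, if_neg h]

-- A in double-quote state runs to the (unescaped) closing quote.
theorem pvLoopA_double (value : List Char) (n : Int) (cs : List Char) (i : Int) :
    pvLoopA value n cs i false true false =
      pvLoopA value n (pvSkipDouble cs i).1 (pvSkipDouble cs i).2 false false false := by
  induction cs, i using pvSkipDouble.induct with
  | case1 i => simp [pvSkipDouble, pvLoopA]
  | case2 rest i ih =>
    have hA : pvLoopA value n ('\\' :: rest) i false true false =
        pvLoopA value n rest (i + 1) false true true := by
      simp only [pvLoopA]
      rw [if_neg (by simp), if_pos (by simp)]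
    rw [hA, pvLoopA_escaped, show i + 1 + 1 = i + 2 from by ring, ih, pvSkipDouble, if_pos rfl]
  | case3 rest i h => simp [pvLoopA, pvSkipDouble]
  | case4 c rest i h1 h2 ih =>
    have hA : pvLoopA value n (c :: rest) i false true false =
        pvLoopA value n rest (i + 1) false true false := by
      simp only [pvLoopA]
      rw [if_neg (by simp), if_neg (by simp [h1]), if_neg (by simp),
        if_neg (by simp [h2]), if_pos (by simp)]
    rw [hA, ih, pvSkipDouble, if_neg h1, if_neg h2]

-- Main correspondence in the outside-quotes state.
theorem pvMain (value : List Char) (n : Int) :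
    ∀ (k : Nat) (cs : List Char), cs.length ≤ k → ∀ (i : Int),
      pvLoopA value n cs i false false false = pvScanOut value n cs i := by
  intro k
  induction k with
  | zero =>
    intro cs h i
    have : cs = [] := List.length_eq_zero_iff.mp (Nat.le_zero.mp h)
    subst this; simp [pvLoopA, pvScanOut]
  | succ k ih =>
    intro cs h i
    cases cs with
    | nil => simp [pvLoopA, pvScanOut]
    | cons c rest =>
      have hr : rest.length ≤ k := by simpa using h
      by_cases h1 : c = '\\'
      · subst h1
        have hA : pvLoopA value n ('\\' :: rest) i false false false =
            pvLoopA value n rest (i + 1) false false true := by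
          simp only [pvLoopA]
          rw [if_neg (by simp), if_pos (by simp)]
        rw [hA, pvLoopA_escaped, show i + 1 + 1 = i + 2 from by ring, pvScanOut, if_pos rfl,
          ih _ (by simp; omega)]
      · by_cases h2 : c = '\''
        · subst h2
          have hA : pvLoopA value n ('\'' :: rest) i false false false =
              pvLoopA value n rest (i + 1) true false false := by
            simp only [pvLoopA]
            rw [if_neg (by simp), if_neg (by simp), if_pos (by simp)]
            simp
          rw [hA, pvLoopA_single, pvScanOut, if_neg (by simp), if_pos rfl,
            ih _ ((pvSkipSingle_len rest (i + 1)).trans hr)]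
        · by_cases h3 : c = '"'
          · subst h3
            have hA : pvLoopA value n ('"' :: rest) i false false false =
                pvLoopA value n rest (i + 1) false true false := by
              simp only [pvLoopA]
              rw [if_neg (by simp), if_neg (by simp), if_neg (by simp), if_pos (by simp)]
              simp
            rw [hA, pvLoopA_double, pvScanOut, if_neg (by simp), if_neg (by simp), if_pos rfl,
              ih _ ((pvSkipDouble_len rest (i + 1)).trans hr)]
          · by_cases h4 : c = '&'
            · subst h4
              have hB : pvScanOut value n ('&' :: rest) i =
                  (if pvNeighborHit value n i then true else pvScanOut value n rest (i + 1)) := by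
                rw [pvScanOut]
                rw [if_neg (by decide), if_neg (by decide), if_neg (by decide)]
                simp
              have hA : pvLoopA value n ('&' :: rest) i false false false =
                  (let prev : Option Char := if i > 0 then PySem.List.pyGet? value (i - 1) else none
                   let next : Option Char := if i + 1 < n then PySem.List.pyGet? value (i + 1) else none
                   if prev = some '<' ∨ prev = some '>' ∨ next = some '<' ∨ next = some '>' then
                     pvLoopA value n rest (i + 1) false false false
                   else if prev ≠ some '&' ∧ next ≠ some '&' then true
                   else pvLoopA value n rest (i + 1) false false false) := by
                simp only [pvLoopA]
                rw [if_neg (by simp), if_neg (by simp [h1]), if_neg (by simp [h2]),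
                  if_neg (by simp [h3]), if_neg (by simp)]
              rw [hA, hB, ih rest hr (i + 1)]
              simp only [pvNeighborHit]
              split_ifs <;> simp_all
            · have hA : pvLoopA value n (c :: rest) i false false false =
                  pvLoopA value n rest (i + 1) false false false := by
                simp only [pvLoopA]
                rw [if_neg (by simp), if_neg (by simp [h1]), if_neg (by simp [h2]),
                  if_neg (by simp [h3]), if_pos (by simp [h4])]
              rw [hA, pvScanOut, if_neg h1, if_neg h2, if_neg h3,
                if_neg (by simp [h4]), ih rest hr (i + 1)]

-- ===== VERDICT =====
theorem shell_text_has_unquoted_background_operator_py_spec : Claim_equal_shell_text_has_unquoted_background_operator_py := by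
  intro text _
  unfold Spec_shell_text_has_unquoted_background_operator_py
  unfold shell_text_has_unquoted_background_operator_py shell_text_has_unquoted_background_operator_py_alt
  exact pvMain _ _ _ _ le_rfl _
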